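-- pv_equiv track=rewrite | github.com/Syhnn/Foobar | Level 3/3-3/level 3-3 opti.py | solution
-- ===== SOURCE A (Python) =====
-- def solution(l):
--   result = 0
--   c = []
--   for i in range(len(l)):
--     c.append(0)
--
--   for i in range(len(l) - 1):
--     for j in range(i + 1, len(l)):
--         if l[j] % l[i] == 0:
--           c[j] = c[j] + 1
--           result = result + c[j]
--
--   return result
-- ===== SOURCE B (Python) =====
-- def solution(l):
--     seen = {}
--     result = 0
--     for x in l:
--         d = 0
--         for v, cnt in seen.items():
--             if v != 0 and x % v == 0:
--                 d += cnt
--         result += d * (d + 1) // 2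
--         seen[x] = seen.get(x, 0) + 1
--     return result
-- ===== Notes on version B (the rewrite author's own statement) =====
-- stated objective: faster
-- what changed: B replaces A's nested index loops over a per-index counter array (incrementing result at every hit) by a single pass that maintains a dict counting the values seen so far: for each element it sums the counts of the distinct earlier values that divide it and adds the triangular number d*(d+1)//2 in closed form.
import Mathlib
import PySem

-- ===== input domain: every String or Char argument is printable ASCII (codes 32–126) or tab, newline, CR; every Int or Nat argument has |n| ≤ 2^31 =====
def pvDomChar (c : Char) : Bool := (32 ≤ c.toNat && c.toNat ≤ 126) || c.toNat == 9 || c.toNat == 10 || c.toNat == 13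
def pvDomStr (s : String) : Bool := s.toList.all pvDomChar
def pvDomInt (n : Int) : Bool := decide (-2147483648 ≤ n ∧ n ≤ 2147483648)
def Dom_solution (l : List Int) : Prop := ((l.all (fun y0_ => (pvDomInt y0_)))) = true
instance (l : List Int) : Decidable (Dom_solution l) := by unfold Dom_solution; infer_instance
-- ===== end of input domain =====

-- B: one pass with a dict counting seen values + closed-form triangular numbers, instead of A's nested index loops over a counter array (alternative decomposition; same worst-case cost).


-- ===== PORT A =====
-- A-side helper: the inner 'for j in range(i+1, len(l))' loop, state = (result, c)
def pvInnerA (l : List Int) (i : Int) (st : Int × List Int) : Int × List Int :=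
  (PySem.List.pyRange (i + 1) (l.length : Int) 1).foldl
    (fun st j =>
      if PySem.Int.mod (PySem.List.pyGetD l j 0) (PySem.List.pyGetD l i 0) = 0 then
        let c := PySem.List.pySetD st.2 j (PySem.List.pyGetD st.2 j 0 + 1)
        (st.1 + PySem.List.pyGetD c j 0, c)
      else st) st

def solution (l : List Int) : Int :=
  let c0 : List Int :=
    (PySem.List.pyRange 0 (l.length : Int) 1).foldl (fun c _ => c ++ [(0 : Int)]) []
  ((PySem.List.pyRange 0 ((l.length : Int) - 1) 1).foldl
      (fun st i => pvInnerA l i st) ((0 : Int), c0)).1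

-- ===== PORT B =====
def solution_alt (l : List Int) : Int :=
  (l.foldl
    (fun (st : PySem.Dict Int Int × Int) x =>
      let d : Int := st.1.items.foldl
        (fun d q => if q.1 ≠ 0 ∧ PySem.Int.mod x q.1 = 0 then d + q.2 else d) 0
      (st.1.insert x (st.1.getD x 0 + 1), st.2 + PySem.Int.floordiv (d * (d + 1)) 2))
    (PySem.Dict.empty, (0 : Int))).2

-- ===== PRECONDITION & SPEC =====
-- Pre_ excludes exactly the inputs on which A raises ZeroDivisionError: a 0 anywhere but last is used as a modulus.
def Pre_solution (l : List Int) : Prop := ∀ x ∈ l.dropLast, x ≠ 0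
instance (l : List Int) : Decidable (Pre_solution l) := by unfold Pre_solution; infer_instance
def pvWitness_solution : List Int := [2, 4, 3, 12, 0]

def Spec_solution (l : List Int) (out : Int) : Prop := out = solution_alt l
instance (l : List Int) (out : Int) : Decidable (Spec_solution l out) := by unfold Spec_solution; infer_instance

-- ===== CLAIM (what is proved, stated in full; the proofs are below) =====
def Claim_equal_solution : Prop := ∀ (l : List Int), Dom_solution l → Pre_solution l → Spec_solution l (solution l)

-- ===== LEMMAS AND PROOFS =====

-- the triangular number d*(d+1)//2
def pvTri (d : Int) : Int := PySem.Int.floordiv (d * (d + 1)) 2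
-- A's divisibility test (total PySem.Int.mod; inside Pre_ A only reaches it with a nonzero divisor)
def pvPredA (x y : Int) : Bool := decide (PySem.Int.mod x y = 0)
-- B's guarded divisibility test
def pvPredB (x y : Int) : Bool := decide (y ≠ 0 ∧ PySem.Int.mod x y = 0)
-- common recursive spec: prefix p already processed; adds tri(count of divisors of x among p) per element
def pvGo (pred : Int → Int → Bool) : List Int → List Int → Int
  | _, [] => 0
  | p, x :: r => pvTri ((p.countP (pred x) : Int)) + pvGo pred (p ++ [x]) r

lemma pvTri_succ (d : Int) : pvTri (d + 1) = pvTri d + (d + 1) := by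
  unfold pvTri
  rw [PySem.Int.floordiv_eq_ediv_of_pos (by norm_num), PySem.Int.floordiv_eq_ediv_of_pos (by norm_num)]
  have h : (d + 1) * (d + 1 + 1) = d * (d + 1) + (d + 1) * 2 := by ring
  rw [h, Int.add_mul_ediv_right _ _ (by norm_num)]

-- ---- B side ----

lemma pv_spike (s : List Int) (x : Int) (c : Int) (hnd : s.Nodup) (hx : x ∈ s) :
    (s.map (fun k => if k = x then c else 0)).sum = c := by
  induction s with
  | nil => cases hx
  | cons a t ih =>
    obtain ⟨hna, hnd'⟩ := List.nodup_cons.1 hnd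
    simp only [List.map_cons, List.sum_cons]
    rcases List.mem_cons.1 hx with h | h
    · rw [if_pos h.symm]
      have hz : ∀ k ∈ t, (if k = x then c else 0) = 0 := by
        intro k hk
        rw [if_neg]; intro he; exact hna (h ▸ he ▸ hk)
      rw [List.map_congr_left hz]
      simp
    · have hne : a ≠ x := fun he => hna (he ▸ h)
      rw [if_neg hne, ih hnd' h]
      ring

lemma pv_sum_ofList (p : List Int) (Q : Int → Bool) :
    ((PySem.Set.ofList p).map (fun k => if Q k then (p.count k : Int) else 0)).sum
      = (p.countP Q : Int) := by
  induction p using List.reverseRecOn with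
  | nil => simp [PySem.Set.ofList]
  | append_singleton p x ih =>
    rw [PySem.Set.ofList_append_singleton]
    by_cases hx : x ∈ p
    · rw [PySem.Set.add_of_mem ((PySem.Set.mem_ofList _ _).2 hx)]
      have hmap : ∀ k ∈ PySem.Set.ofList p,
          (if Q k then ((p ++ [x]).count k : Int) else 0)
          = (if Q k then (p.count k : Int) else 0) + (if k = x then (if Q x then (1:Int) else 0) else 0) := by
        intro k hk
        by_cases hkx : k = x
        · subst hkx
          simp [List.count_append]
          by_cases hq : Q k <;> simp [hq]
        · simp [List.count_append, hkx, Ne.symm hkx]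
      rw [List.map_congr_left hmap, PySem.List.sum_map_add_int,
        pv_spike _ _ _ (PySem.Set.nodup_ofList p) ((PySem.Set.mem_ofList _ _).2 hx), ih]
      by_cases hq : Q x <;> simp [List.countP_append, hq]
    · rw [PySem.Set.add_of_not_mem (fun h => hx ((PySem.Set.mem_ofList _ _).1 h))]
      rw [List.map_append, List.sum_append]
      have hmap : ∀ k ∈ PySem.Set.ofList p,
          (if Q k then ((p ++ [x]).count k : Int) else 0)
          = (if Q k then (p.count k : Int) else 0) := by
        intro k hk
        have hkx : k ≠ x := fun he => hx (he ▸ (PySem.Set.mem_ofList _ _).1 hk)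
        simp [List.count_append, Ne.symm hkx]
      rw [List.map_congr_left hmap, ih]
      have hcx : p.count x = 0 := List.count_eq_zero.2 hx
      by_cases hq : Q x <;> simp [List.count_append, List.countP_append, hcx, hq]

lemma pv_d_eq (p : List Int) (x : Int) :
    ((PySem.Dict.counter p : PySem.Dict Int Int).items).foldl
      (fun d q => if q.1 ≠ 0 ∧ PySem.Int.mod x q.1 = 0 then d + q.2 else d) 0
    = (p.countP (pvPredB x) : Int) := by
  rw [PySem.Dict.items_counter, List.foldl_map]
  have hfun : (fun (d k : Int) => if k ≠ 0 ∧ PySem.Int.mod x k = 0 then d + (p.count k : Int) else d)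
      = fun (d k : Int) => d + (if pvPredB x k then (p.count k : Int) else 0) := by
    funext d k
    by_cases h : k ≠ 0 ∧ PySem.Int.mod x k = 0
    · rw [if_pos h, if_pos (by simpa [pvPredB] using h)]
    · rw [if_neg h, if_neg (by simpa [pvPredB] using h)]
      ring
  rw [hfun, PySem.List.foldl_add, pv_sum_ofList, zero_add]

lemma pv_counter_snoc (p : List Int) (x : Int) :
    PySem.Dict.counter (p ++ [x])
      = (PySem.Dict.counter p).insert x ((PySem.Dict.counter p).getD x 0 + 1) := by
  rw [← PySem.Dict.foldl_insert_getD_add_one_eq_counter, ← PySem.Dict.foldl_insert_getD_add_one_eq_counter]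
  simp [List.foldl_append]

lemma pv_alt_go (r : List Int) : ∀ (p : List Int) (acc : Int),
    (r.foldl
      (fun (st : PySem.Dict Int Int × Int) x =>
        let d : Int := st.1.items.foldl
          (fun d q => if q.1 ≠ 0 ∧ PySem.Int.mod x q.1 = 0 then d + q.2 else d) 0
        (st.1.insert x (st.1.getD x 0 + 1), st.2 + PySem.Int.floordiv (d * (d + 1)) 2))
      (PySem.Dict.counter p, acc)).2 = acc + pvGo pvPredB p r := by
  induction r with
  | nil => intro p acc; simp [pvGo]
  | cons y r' ih =>
    intro p acc
    rw [List.foldl_cons]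
    show (r'.foldl _ ((PySem.Dict.counter p).insert y ((PySem.Dict.counter p).getD y 0 + 1),
        acc + PySem.Int.floordiv _ 2)).2 = _
    rw [← pv_counter_snoc, pv_d_eq]
    rw [ih (p ++ [y])]
    show acc + pvTri _ + pvGo pvPredB (p ++ [y]) r' = _
    rw [pvGo]
    ring

lemma pv_alt_eq (l : List Int) : solution_alt l = pvGo pvPredB [] l := by
  unfold solution_alt
  rw [show (PySem.Dict.empty : PySem.Dict Int Int) = PySem.Dict.counter ([] : List Int) from rfl,
    pv_alt_go l [] 0, zero_add]

-- ---- A side ----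

-- value at Int index, count of divisors among the first (min k j) elements
def pvVal (l : List Int) (j : Int) : Int := PySem.List.pyGetD l j 0
def pvCnt (l : List Int) (k j : Int) : Int :=
  ((l.take (min k j).toNat).countP (pvPredA (pvVal l j)) : Int)

lemma pvCnt_zero (l : List Int) (j : Int) (hj : 0 ≤ j) : pvCnt l 0 j = 0 := by
  unfold pvCnt
  rw [min_eq_left hj]
  simp

lemma pvCnt_small (l : List Int) (k j : Int) (hj : j ≤ k) : pvCnt l (k + 1) j = pvCnt l k j := by
  unfold pvCnt
  rw [min_eq_right hj, min_eq_right (by omega)]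

lemma pvCnt_succ (l : List Int) (k j : Int) (h0 : 0 ≤ k) (hk : k < (l.length : Int)) (hj : k + 1 ≤ j) :
    pvCnt l (k + 1) j = pvCnt l k j + (if pvPredA (pvVal l j) (pvVal l k) then 1 else 0) := by
  unfold pvCnt
  rw [min_eq_left (by omega), min_eq_left (by omega)]
  have h1 : (k + 1).toNat = k.toNat + 1 := by omega
  have h2 : k.toNat < l.length := by omega
  rw [h1, List.take_add_one, List.countP_append]
  have h3 : l[k.toNat]? = some l[k.toNat] := List.getElem?_eq_getElem h2
  have h4 : pvVal l k = l[k.toNat] := by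
    have hk' : k = ((k.toNat : Nat) : Int) := by omega
    conv_lhs => rw [pvVal, hk', PySem.List.pyGetD_natCast, List.getD_eq_getElem?_getD, h3]
    rfl
  rw [h3, h4]
  by_cases hp : pvPredA (pvVal l j) l[k.toNat] <;> simp [hp]

lemma pv_innerA_core (l : List Int) (i : Int) : ∀ (m : Nat) (a : Int), 0 ≤ a →
    (((l.length : Int) - a).toNat = m) → ∀ (c : List Int) (r : Int), c.length = l.length →
    (((PySem.List.pyRange a (l.length : Int) 1).foldl
      (fun st j =>
        if PySem.Int.mod (PySem.List.pyGetD l j 0) (PySem.List.pyGetD l i 0) = 0 then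
          let c := PySem.List.pySetD st.2 j (PySem.List.pyGetD st.2 j 0 + 1)
          (st.1 + PySem.List.pyGetD c j 0, c)
        else st) (r, c)).2.length = l.length)
    ∧ (∀ j : Int, 0 ≤ j → j < (l.length : Int) →
        PySem.List.pyGetD ((PySem.List.pyRange a (l.length : Int) 1).foldl
          (fun st j =>
            if PySem.Int.mod (PySem.List.pyGetD l j 0) (PySem.List.pyGetD l i 0) = 0 then
              let c := PySem.List.pySetD st.2 j (PySem.List.pyGetD st.2 j 0 + 1)
              (st.1 + PySem.List.pyGetD c j 0, c)
            else st) (r, c)).2 j 0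
        = PySem.List.pyGetD c j 0
          + (if a ≤ j ∧ pvPredA (pvVal l j) (pvVal l i) then 1 else 0))
    ∧ (((PySem.List.pyRange a (l.length : Int) 1).foldl
        (fun st j =>
          if PySem.Int.mod (PySem.List.pyGetD l j 0) (PySem.List.pyGetD l i 0) = 0 then
            let c := PySem.List.pySetD st.2 j (PySem.List.pyGetD st.2 j 0 + 1)
            (st.1 + PySem.List.pyGetD c j 0, c)
          else st) (r, c)).1
       = r + ((PySem.List.pyRange a (l.length : Int) 1).map
          (fun j => if pvPredA (pvVal l j) (pvVal l i) then PySem.List.pyGetD c j 0 + 1 else 0)).sum) := by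
  intro m
  induction m with
  | zero =>
    intro a ha hm c r hc
    have hnil : PySem.List.pyRange a (l.length : Int) 1 = [] :=
      PySem.List.pyRange_one_eq_nil (by omega)
    rw [hnil]
    refine ⟨hc, ?_, by simp⟩
    intro j hj0 hjn
    have : ¬ (a ≤ j) := by omega
    simp [this]
  | succ m ih =>
    intro a ha hm c r hc
    have hlt : a < (l.length : Int) := by omega
    rw [PySem.List.pyRange_one_cons hlt]
    simp only [List.foldl_cons]
    have hget : PySem.List.pyGetD (PySem.List.pySetD c a (PySem.List.pyGetD c a 0 + 1)) a 0
        = PySem.List.pyGetD c a 0 + 1 := by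
      have ha' : a = ((a.toNat : Nat) : Int) := by omega
      rw [ha', PySem.List.pyGetD_pySetD_natCast _ _ _ _ _ (by omega), if_pos rfl]
    by_cases hp : PySem.Int.mod (PySem.List.pyGetD l a 0) (PySem.List.pyGetD l i 0) = 0
    · rw [if_pos hp]
      obtain ⟨ih1, ih2, ih3⟩ := ih (a + 1) (by omega) (by omega)
        (PySem.List.pySetD c a (PySem.List.pyGetD c a 0 + 1))
        (r + PySem.List.pyGetD (PySem.List.pySetD c a (PySem.List.pyGetD c a 0 + 1)) a 0)
        (by rw [PySem.List.length_pySetD]; exact hc)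
      refine ⟨ih1, ?_, ?_⟩
      · intro j hj0 hjn
        rw [ih2 j hj0 hjn]
        have ha' : a = ((a.toNat : Nat) : Int) := by omega
        by_cases hja : j = a
        · subst hja
          rw [hget]
          have h1 : ¬ (j + 1 ≤ j) := by omega
          have h2 : pvPredA (pvVal l j) (pvVal l i) = true := by
            simp [pvPredA, pvVal, hp]
          simp [h1, h2]
        · have hj' : j = ((j.toNat : Nat) : Int) := by omega
          rw [ha', hj', PySem.List.pyGetD_pySetD_natCast _ _ _ _ _ (by omega),
            if_neg (show ¬ (j.toNat = a.toNat) by omega), ← ha', ← hj']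
          have h12 : (a + 1 ≤ j) ↔ (a ≤ j) := by omega
          simp only [h12]
      · rw [ih3, hget]
        have hmap : ∀ j ∈ PySem.List.pyRange (a + 1) (l.length : Int) 1,
            (if pvPredA (pvVal l j) (pvVal l i) then
              PySem.List.pyGetD (PySem.List.pySetD c a (PySem.List.pyGetD c a 0 + 1)) j 0 + 1 else 0)
            = (if pvPredA (pvVal l j) (pvVal l i) then PySem.List.pyGetD c j 0 + 1 else 0) := by
          intro j hj
          have hj' := (PySem.List.mem_pyRange_one).1 hj
          have ha' : a = ((a.toNat : Nat) : Int) := by omega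
          have hj2 : j = ((j.toNat : Nat) : Int) := by omega
          rw [ha', hj2, PySem.List.pyGetD_pySetD_natCast _ _ _ _ _ (by omega),
            if_neg (show ¬ (j.toNat = a.toNat) by omega)]
        rw [List.map_congr_left hmap]
        have hpa : pvPredA (pvVal l a) (pvVal l i) = true := by simp [pvPredA, pvVal, hp]
        simp [hpa]
        ring
    · rw [if_neg hp]
      obtain ⟨ih1, ih2, ih3⟩ := ih (a + 1) (by omega) (by omega) c r hc
      refine ⟨ih1, ?_, ?_⟩
      · intro j hj0 hjn
        rw [ih2 j hj0 hjn]
        by_cases hja : j = a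
        · subst hja
          have h1 : ¬ (j + 1 ≤ j) := by omega
          have h2 : pvPredA (pvVal l j) (pvVal l i) = false := by
            simp [pvPredA, pvVal, hp]
          simp [h1, h2]
        · have h12 : (a + 1 ≤ j) ↔ (a ≤ j) := by omega
          simp only [h12]
      · rw [ih3]
        have hpa : pvPredA (pvVal l a) (pvVal l i) = false := by simp [pvPredA, pvVal, hp]
        simp [hpa]

lemma pv_innerA_spec (l : List Int) (i : Int) (hi : 0 ≤ i + 1) (S : Int × List Int)
    (hlen : S.2.length = l.length) :
    ((pvInnerA l i S).2.length = l.length)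
    ∧ (∀ j : Int, 0 ≤ j → j < (l.length : Int) →
        PySem.List.pyGetD (pvInnerA l i S).2 j 0
        = PySem.List.pyGetD S.2 j 0
          + (if i + 1 ≤ j ∧ pvPredA (pvVal l j) (pvVal l i) then 1 else 0))
    ∧ ((pvInnerA l i S).1
       = S.1 + ((PySem.List.pyRange (i + 1) (l.length : Int) 1).map
          (fun j => if pvPredA (pvVal l j) (pvVal l i) then PySem.List.pyGetD S.2 j 0 + 1 else 0)).sum) := by
  exact pv_innerA_core l i (((l.length : Int) - (i + 1)).toNat) (i + 1) hi rfl S.2 S.1 hlen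

lemma pv_c0_facts (l : List Int) :
    ((PySem.List.pyRange 0 (l.length : Int) 1).foldl (fun c _ => c ++ [(0 : Int)]) []).length = l.length
    ∧ ∀ j : Int, 0 ≤ j → j < (l.length : Int) →
      PySem.List.pyGetD ((PySem.List.pyRange 0 (l.length : Int) 1).foldl (fun c _ => c ++ [(0 : Int)]) []) j 0 = 0 := by
  have h : (PySem.List.pyRange 0 (l.length : Int) 1).foldl (fun c _ => c ++ [(0 : Int)]) []
      = (PySem.List.pyRange 0 (l.length : Int) 1).map (fun _ => (0 : Int)) := by
    rw [PySem.List.foldl_append_singleton_eq_map (fun _ => (0:Int)) _ []]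
    rfl
  rw [h]
  constructor
  · rw [List.length_map, PySem.List.length_pyRange_one]
    omega
  · intro j hj0 hjn
    rw [PySem.List.pyGetD_map_pyRange_of_nonneg _ _ _ _ hj0 hjn]

lemma pv_outer_inv (l : List Int) : ∀ (m : Nat), (m : Int) ≤ (l.length : Int) - 1 →
    (((PySem.List.pyRange 0 (m : Int) 1).foldl (fun st i => pvInnerA l i st)
        ((0 : Int), (PySem.List.pyRange 0 (l.length : Int) 1).foldl (fun c _ => c ++ [(0 : Int)]) [])).2.length = l.length)
    ∧ (∀ j : Int, 0 ≤ j → j < (l.length : Int) →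
        PySem.List.pyGetD (((PySem.List.pyRange 0 (m : Int) 1).foldl (fun st i => pvInnerA l i st)
          ((0 : Int), (PySem.List.pyRange 0 (l.length : Int) 1).foldl (fun c _ => c ++ [(0 : Int)]) [])).2) j 0
        = pvCnt l (m : Int) j)
    ∧ (((PySem.List.pyRange 0 (m : Int) 1).foldl (fun st i => pvInnerA l i st)
        ((0 : Int), (PySem.List.pyRange 0 (l.length : Int) 1).foldl (fun c _ => c ++ [(0 : Int)]) [])).1
       = ((PySem.List.pyRange 0 (l.length : Int) 1).map (fun j => pvTri (pvCnt l (m : Int) j))).sum) := by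
  intro m
  induction m with
  | zero =>
    intro hm
    obtain ⟨hc0len, hc0get⟩ := pv_c0_facts l
    rw [show ((0 : Nat) : Int) = 0 from rfl, PySem.List.pyRange_one_eq_nil le_rfl]
    simp only [List.foldl_nil]
    refine ⟨hc0len, ?_, ?_⟩
    · intro j hj0 hjn
      rw [hc0get j hj0 hjn, pvCnt_zero l j hj0]
    · have hmap : ∀ j ∈ PySem.List.pyRange 0 (l.length : Int) 1, pvTri (pvCnt l 0 j) = 0 := by
        intro j hj
        have hb := (PySem.List.mem_pyRange_one).1 hj
        rw [pvCnt_zero l j hb.1]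
        decide
      rw [List.map_congr_left hmap]
      simp
  | succ m ih =>
    intro hm
    have hm' : (m : Int) ≤ (l.length : Int) - 1 := by push_cast at hm ⊢; omega
    obtain ⟨P1, P2, P3⟩ := ih hm'
    have hcast : ((m + 1 : Nat) : Int) = (m : Int) + 1 := by push_cast; ring
    rw [hcast, PySem.List.pyRange_one_succ_right (by omega), List.foldl_append,
      List.foldl_cons, List.foldl_nil]
    obtain ⟨C1, C2, C3⟩ := pv_innerA_spec l (m : Int) (by omega) _ P1
    refine ⟨C1, ?_, ?_⟩
    · intro j hj0 hjn
      rw [C2 j hj0 hjn, P2 j hj0 hjn]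
      by_cases hle : (m : Int) + 1 ≤ j
      · rw [pvCnt_succ l (m : Int) j (by omega) (by omega) hle]
        simp [hle]
      · rw [pvCnt_small l (m : Int) j (by omega)]
        simp [hle]
    · rw [C3, P3]
      have hmap1 : ∀ j ∈ PySem.List.pyRange ((m : Int) + 1) (l.length : Int) 1,
          (if pvPredA (pvVal l j) (pvVal l (m : Int)) then
            PySem.List.pyGetD (((PySem.List.pyRange 0 (m : Int) 1).foldl (fun st i => pvInnerA l i st)
              ((0 : Int), (PySem.List.pyRange 0 (l.length : Int) 1).foldl (fun c _ => c ++ [(0 : Int)]) [])).2) j 0 + 1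
          else 0)
          = (if pvPredA (pvVal l j) (pvVal l (m : Int)) then pvCnt l (m : Int) j + 1 else 0) := by
        intro j hj
        have hj' := (PySem.List.mem_pyRange_one).1 hj
        rw [P2 j (by omega) hj'.2]
      rw [List.map_congr_left hmap1]
      rw [PySem.List.pyRange_one_append 0 ((m : Int) + 1) (l.length : Int) (by omega) (by omega),
        List.map_append, List.sum_append, List.map_append, List.sum_append]
      have hmapL : ∀ j ∈ PySem.List.pyRange 0 ((m : Int) + 1) 1,
          pvTri (pvCnt l ((m : Int) + 1) j) = pvTri (pvCnt l (m : Int) j) := by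
        intro j hj
        have hj' := (PySem.List.mem_pyRange_one).1 hj
        rw [pvCnt_small l (m : Int) j (by omega)]
      have hmapR : ∀ j ∈ PySem.List.pyRange ((m : Int) + 1) (l.length : Int) 1,
          pvTri (pvCnt l ((m : Int) + 1) j)
          = pvTri (pvCnt l (m : Int) j) + (if pvPredA (pvVal l j) (pvVal l (m : Int)) then pvCnt l (m : Int) j + 1 else 0) := by
        intro j hj
        have hj' := (PySem.List.mem_pyRange_one).1 hj
        rw [pvCnt_succ l (m : Int) j (by omega) (by omega) hj'.1]
        by_cases hp : pvPredA (pvVal l j) (pvVal l (m : Int))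
        · rw [if_pos hp, if_pos hp, pvTri_succ]
        · rw [if_neg hp, if_neg hp]
          ring
      rw [List.map_congr_left hmapL, List.map_congr_left hmapR, PySem.List.sum_map_add_int]
      abel

lemma pv_go_eq_sum (pred : Int → Int → Bool) :
    ∀ (r p : List Int), pvGo pred p r
      = ((List.range r.length).map
          (fun j => pvTri (((p ++ r.take j).countP (pred (r.getD j 0)) : Nat) : Int))).sum := by
  intro r
  induction r with
  | nil => intro p; simp [pvGo]
  | cons x r' ih =>
    intro p
    rw [pvGo, List.length_cons, List.range_succ_eq_map, List.map_cons, List.sum_cons, List.map_map]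
    congr 1
    · simp
    · rw [ih (p ++ [x])]
      congr 1
      apply List.map_congr_left
      intro j hj
      simp [List.append_assoc]

lemma pv_a_eq (l : List Int) : solution l = pvGo pvPredA [] l := by
  unfold solution
  by_cases hn : l = []
  · subst hn
    rfl
  · have hlen : 1 ≤ l.length := List.length_pos_iff.2 hn
    have hcast : ((l.length : Int) - 1) = ((l.length - 1 : Nat) : Int) := by omega
    rw [hcast]
    obtain ⟨_, _, P3⟩ := pv_outer_inv l (l.length - 1) (by omega)
    rw [P3, pv_go_eq_sum pvPredA l []]
    rw [PySem.List.pyRange_one 0 (l.length : Int), List.map_map, sub_zero, Int.toNat_natCast]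
    congr 1
    apply List.map_congr_left
    intro j hj
    have hjlt : j < l.length := by
      have := List.mem_range.1 hj
      omega
    show pvTri (pvCnt l ((l.length - 1 : Nat) : Int) (0 + (j : Int))) = _
    have hz : (0 : Int) + (j : Int) = ((j : Nat) : Int) := by ring
    rw [hz]
    unfold pvCnt
    rw [min_eq_right (by omega)]
    have ht : (((j : Nat) : Int)).toNat = j := by omega
    rw [ht]
    have hv : pvVal l ((j : Nat) : Int) = l.getD j 0 := by
      rw [pvVal, PySem.List.pyGetD_natCast]
    rw [hv]
    simp

-- ===== VERDICT (by name: the statement is the Claim_ definition above) =====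
lemma pv_go_congr : ∀ (r p : List Int), (∀ y ∈ p ++ r.dropLast, y ≠ 0) →
    pvGo pvPredA p r = pvGo pvPredB p r := by
  intro r
  induction r with
  | nil => intro p h; rfl
  | cons x r' ih =>
    intro p h
    have hp : ∀ y ∈ p, y ≠ 0 := fun y hy => h y (List.mem_append_left _ hy)
    have hcnt : p.countP (pvPredA x) = p.countP (pvPredB x) := by
      apply List.countP_congr
      intro y hy
      simp [pvPredA, pvPredB, hp y hy]
    rw [pvGo, pvGo, hcnt]
    congr 1
    cases r' with
    | nil => rfl
    | cons z r'' =>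
      apply ih
      intro y hy
      rcases List.mem_append.1 hy with hy | hy
      · rcases List.mem_append.1 hy with hy | hy
        · exact hp y hy
        · have hyx : y = x := by simpa using hy
          subst hyx
          exact h y (by simp)
      · exact h y (by simp [hy])

theorem solution_spec : Claim_equal_solution := by
  intro l _ hpre
  unfold Spec_solution
  rw [pv_a_eq, pv_alt_eq, pv_go_congr l [] (by simpa using hpre)]
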